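-- pv_equiv track=rewrite | github.com/lanaijun347/PythonStudyLib | BYD_Project/basics.py | cmd_insert_space_can
-- ===== SOURCE A (Python) =====
-- def cmd_insert_space_can(str1):
--     str2 = list(str1)
--     len1 = len(str2)
--     j = 0
--     for i in range(0, len1, 2):
--         str2.insert(i+j, ' ')
--         j += 1
--     out_str = ''.join(str2).upper()
--     return out_str
-- ===== SOURCE B (Python) =====
-- def cmd_insert_space_can(str1):
--     out = []
--     for i, ch in enumerate(str1):
--         if i % 2 == 0:
--             out.append(' ')
--         out.append(ch)
--     return ''.join(out).upper()
-- ===== Notes on version B (the rewrite author's own statement) =====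
-- stated objective: faster
-- what changed: Replaces A's positional list.insert loop (inserting spaces at shifting indices i+j into a mutable copy, each insert shifting the tail) with a single forward pass over enumerate that appends a space before every even-indexed character.
import Mathlib
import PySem

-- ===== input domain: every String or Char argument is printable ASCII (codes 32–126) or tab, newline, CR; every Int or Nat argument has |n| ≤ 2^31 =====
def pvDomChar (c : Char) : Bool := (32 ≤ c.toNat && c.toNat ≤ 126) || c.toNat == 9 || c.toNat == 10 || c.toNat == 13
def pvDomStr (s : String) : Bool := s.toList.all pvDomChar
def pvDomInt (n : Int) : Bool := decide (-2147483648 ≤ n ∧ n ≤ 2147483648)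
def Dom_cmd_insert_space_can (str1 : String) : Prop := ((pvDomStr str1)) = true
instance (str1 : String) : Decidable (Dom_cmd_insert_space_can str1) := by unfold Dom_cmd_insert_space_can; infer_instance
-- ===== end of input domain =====

-- B replaces A's positional list.insert loop by one forward pass appending a space before
-- every even-indexed character (objective: simpler, O(n) instead of A's quadratic inserts).

-- ===== PORT A =====
-- ''.join over a list of single characters is exactly String.mk of that char list.
def cmd_insert_space_can (str1 : String) : String :=
  let str2 := str1.toList
  let len1 : Int := str2.length
  let res := (PySem.List.pyRange 0 len1 2).foldl
    (fun (st : List Char × Int) i => (PySem.List.insert st.1 (i + st.2) ' ', st.2 + 1))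
    (str2, 0)
  PySem.Str.upper (String.mk res.1)

-- ===== PORT B =====
def cmd_insert_space_can_alt (str1 : String) : String :=
  let out := (PySem.List.enumerate str1.toList).foldl
    (fun acc (p : Int × Char) =>
      (if PySem.Int.mod p.1 2 == 0 then acc ++ [' '] else acc) ++ [p.2]) []
  PySem.Str.upper (String.mk out)

-- ===== PRECONDITION & SPEC =====
def Spec_cmd_insert_space_can (str1 : String) (out : String) : Prop := out = cmd_insert_space_can_alt str1
instance (str1 : String) (out : String) : Decidable (Spec_cmd_insert_space_can str1 out) := by unfold Spec_cmd_insert_space_can; infer_instance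

-- ===== CLAIM (what is proved, stated in full; the proofs are below) =====
def Claim_equal_cmd_insert_space_can : Prop := ∀ (str1 : String), Dom_cmd_insert_space_can str1 → Spec_cmd_insert_space_can str1 (cmd_insert_space_can str1)

-- ===== LEMMAS AND PROOFS =====

-- the common reference result: a space before every pair of characters
def pvSpaced : List Char → List Char
  | [] => []
  | [a] => [' ', a]
  | a :: b :: t => ' ' :: a :: b :: pvSpaced t

theorem pvLoopB (t : List Char) : ∀ (acc : List Char) (j : Nat),
    (PySem.List.enumerate t (2 * (j : Int))).foldl
      (fun acc (p : Int × Char) =>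
        (if PySem.Int.mod p.1 2 == 0 then acc ++ [' '] else acc) ++ [p.2]) acc
    = acc ++ pvSpaced t := by
  induction t using pvSpaced.induct with
  | case1 => intro acc j; simp [PySem.List.enumerate, pvSpaced]
  | case2 a =>
      intro acc j
      simp [PySem.List.enumerate, pvSpaced]
  | case3 a b t ih =>
      intro acc j
      rw [PySem.List.enumerate_cons, PySem.List.enumerate_cons]
      simp only [List.foldl_cons]
      have h2 : (2 * (j : Int)) + 1 + 1 = 2 * ((j + 1 : Nat) : Int) := by push_cast; ring
      rw [h2, ih _ (j + 1)]
      simp [pvSpaced]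

theorem pvLoopA (t : List Char) : ∀ (pre : List Char) (j : Nat), pre.length = 3 * j →
    (List.range ((t.length + 1) / 2)).foldl
      (fun (st : List Char × Int) (c : Nat) =>
        (PySem.List.insert st.1 (2 * ((j : Int) + (c : Int)) + st.2) ' ', st.2 + 1))
      (pre ++ t, (j : Int))
    = (pre ++ pvSpaced t, (j : Int) + ((t.length + 1) / 2 : Nat)) := by
  induction t using pvSpaced.induct with
  | case1 => intro pre j hp; simp [pvSpaced]
  | case2 a =>
      intro pre j hp
      have hins : PySem.List.insert (pre ++ [a]) ((3 * j : Nat) : Int) ' '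
          = pre ++ [' ', a] := by
        rw [PySem.List.insert_natCast _ _ _ (by simp [hp])]
        simp [← hp]
      have h1 : (([a] : List Char).length + 1) / 2 = 1 := by simp
      rw [h1, List.range_one]
      simp only [List.foldl_cons, List.foldl_nil, Nat.cast_zero, add_zero]
      have h3 : 2 * (j : Int) + (j : Int) = ((3 * j : Nat) : Int) := by push_cast; ring
      rw [h3, hins]
      norm_num [pvSpaced]
  | case3 a b t ih =>
      intro pre j hp
      have hm : ((a :: b :: t).length + 1) / 2 = (t.length + 1) / 2 + 1 := by
        change (t.length + 1 + 1 + 1) / 2 = (t.length + 1) / 2 + 1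
        omega
      rw [hm, List.range_succ_eq_map]
      simp only [List.foldl_cons, List.foldl_map, Nat.succ_eq_add_one, Nat.cast_zero, add_zero]
      have hins : PySem.List.insert (pre ++ a :: b :: t) (2 * (j : Int) + (j : Int)) ' '
          = pre ++ ' ' :: a :: b :: t := by
        have h3 : 2 * (j : Int) + (j : Int) = ((3 * j : Nat) : Int) := by push_cast; ring
        rw [h3, PySem.List.insert_natCast _ _ _ (by simp [hp])]
        simp [← hp]
      rw [hins]
      have hf : (fun (st : List Char × Int) (c : Nat) =>
            (PySem.List.insert st.1 (2 * ((j : Int) + ((c + 1 : Nat) : Int)) + st.2) ' ', st.2 + 1))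
          = (fun (st : List Char × Int) (c : Nat) =>
            (PySem.List.insert st.1 (2 * (((j + 1 : Nat) : Int) + (c : Int)) + st.2) ' ', st.2 + 1)) := by
        funext st c
        have : 2 * ((j : Int) + ((c + 1 : Nat) : Int)) = 2 * (((j + 1 : Nat) : Int) + (c : Int)) := by
          push_cast; ring
        rw [this]
      rw [hf]
      have hpre : (pre ++ [' ', a, b]).length = 3 * (j + 1) := by simp [hp]; ring
      have hstate : pre ++ ' ' :: a :: b :: t = (pre ++ [' ', a, b]) ++ t := by simp
      have hj : (j : Int) + 1 = ((j + 1 : Nat) : Int) := by push_cast; ring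
      rw [hstate, hj, ih _ (j + 1) hpre]
      simp only [pvSpaced, Prod.mk.injEq]
      exact ⟨by simp, by push_cast; ring⟩

theorem pvRangeCount (l : List Char) :
    PySem.List.pyRange 0 (l.length : Int) 2
      = (List.range ((l.length + 1) / 2)).map (fun k : Nat => 2 * (k : Int)) := by
  rw [PySem.List.pyRange_of_pos _ _ (by norm_num)]
  have hcount : (if (0 : Int) < (l.length : Int) then (((l.length : Int) - 0 + 2 - 1) / 2).toNat else 0)
      = (l.length + 1) / 2 := by
    split_ifs with h
    · omega
    · omega
  rw [hcount]
  simp only [zero_add]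

-- ===== VERDICT (by name: the statement is the Claim_ definition above) =====
theorem cmd_insert_space_can_spec : Claim_equal_cmd_insert_space_can := by
  intro str1 _
  simp only [Spec_cmd_insert_space_can, cmd_insert_space_can, cmd_insert_space_can_alt]
  have hB := pvLoopB str1.toList [] 0
  simp only [Nat.cast_zero, mul_zero, List.nil_append] at hB
  have hA0 := pvLoopA str1.toList [] 0 (by simp)
  simp only [Nat.cast_zero, List.nil_append, zero_add] at hA0
  have h1 := congrArg Prod.fst hA0
  simp only at h1
  rw [pvRangeCount, List.foldl_map]
  rw [show (PySem.List.enumerate str1.toList) = (PySem.List.enumerate str1.toList 0) from rfl, hB]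
  rw [h1]
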